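-- pv_equiv track=rewrite | github.com/chan-y-park/loom | loom/misc.py | get_splits_with_overlap
-- ===== SOURCE A (Python) =====
-- def get_splits_with_overlap(splits):
--     """
--     Get the start & the end indicies of a list according to the splits.
--
--     When the given split is [i_0, i_1, ...], this returns
--     [
--         [0, i_0 + 1],
--         [i_0, i_1 + 1],
--         ...
--     ]
--     """
--     new_splits = []
--     start = 0
--     for split in splits:
--         stop = split + 1
--         new_splits.append((start, stop))
--         start = split
--     new_splits.append((start, None))
--     return new_splits
-- ===== SOURCE B (Python) =====
-- def get_splits_with_overlap(splits):
--     def go(start, rest):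
--         if not rest:
--             return [(start, None)]
--         head = rest[0]
--         return [(start, head + 1)] + go(head, rest[1:])
--     return go(0, list(splits))
-- ===== Notes on version B (the rewrite author's own statement) =====
-- stated objective: alternative
-- what changed: Replaces A's iterative loop that mutates a running 'start' and appends to one accumulator list with a structural recursion on the splits list that builds the interval list front-to-back by consing, with the final (start, None) pair as the base case.
import Mathlib
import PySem

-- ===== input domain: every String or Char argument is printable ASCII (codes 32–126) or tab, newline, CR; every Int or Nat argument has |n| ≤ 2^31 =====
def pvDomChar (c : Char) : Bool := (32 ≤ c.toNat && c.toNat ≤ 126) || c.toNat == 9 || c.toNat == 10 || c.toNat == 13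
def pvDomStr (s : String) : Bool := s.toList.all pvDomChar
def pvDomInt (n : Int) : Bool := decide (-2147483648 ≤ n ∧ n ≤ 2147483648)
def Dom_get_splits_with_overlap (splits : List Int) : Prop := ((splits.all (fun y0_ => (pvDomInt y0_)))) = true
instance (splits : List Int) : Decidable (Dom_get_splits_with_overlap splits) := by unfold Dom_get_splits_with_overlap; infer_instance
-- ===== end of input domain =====

-- B replaces A's accumulator loop (running 'start', list appends) by a structural recursion consing intervals front-to-back (alternative decomposition; same cost).

-- ===== PORT A =====
-- A: loop carrying (new_splits, start); append (start, split+1), update start; finally append (start, None).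
def get_splits_with_overlap (splits : List Int) : List (Int × Option Int) :=
  let st := splits.foldl
    (fun (p : List (Int × Option Int) × Int) split =>
      (p.1 ++ [(p.2, some (split + 1))], split)) ([], 0)
  st.1 ++ [(st.2, none)]

-- ===== PORT B =====
-- B's helper go: recursion on the rest of the list, base case [(start, None)].
def goSplits (start : Int) : List Int → List (Int × Option Int)
  | [] => [(start, none)]
  | head :: rest => (start, some (head + 1)) :: goSplits head rest

def get_splits_with_overlap_alt (splits : List Int) : List (Int × Option Int) :=
  goSplits 0 splits

-- ===== PRECONDITION & SPEC =====
def Spec_get_splits_with_overlap (splits : List Int) (out : List (Int × Option Int)) : Prop := out = get_splits_with_overlap_alt splits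
instance (splits : List Int) (out : List (Int × Option Int)) : Decidable (Spec_get_splits_with_overlap splits out) := by unfold Spec_get_splits_with_overlap; infer_instance

-- ===== CLAIM (what is proved, stated in full; the proofs are below) =====
def Claim_equal_get_splits_with_overlap : Prop := ∀ (splits : List Int), Dom_get_splits_with_overlap splits → Spec_get_splits_with_overlap splits (get_splits_with_overlap splits)

-- ===== LEMMAS AND PROOFS =====

-- Loop invariant: A's fold from state (acc, start), followed by the final append,
-- equals acc ++ B's recursion from 'start'.
theorem pv_fold_eq (splits : List Int) (acc : List (Int × Option Int)) (start : Int) :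
    (splits.foldl
        (fun (p : List (Int × Option Int) × Int) split =>
          (p.1 ++ [(p.2, some (split + 1))], split)) (acc, start)).1 ++
      [((splits.foldl
        (fun (p : List (Int × Option Int) × Int) split =>
          (p.1 ++ [(p.2, some (split + 1))], split)) (acc, start)).2, none)]
    = acc ++ goSplits start splits := by
  induction splits generalizing acc start with
  | nil => simp [goSplits]
  | cons x xs ih =>
      simp only [List.foldl_cons, goSplits]
      rw [ih]
      simp

-- ===== VERDICT (by name: the statement is the Claim_ definition above) =====
theorem get_splits_with_overlap_spec : Claim_equal_get_splits_with_overlap := by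
  intro splits _
  show get_splits_with_overlap splits = get_splits_with_overlap_alt splits
  unfold get_splits_with_overlap get_splits_with_overlap_alt
  simpa using pv_fold_eq splits [] 0
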